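-- pv_equiv track=rewrite | github.com/sushovit29/shakespeare_chatbot | shakespeare_chatbot.py | _preprocess_corpus
-- ===== SOURCE A (Python) =====
-- def _preprocess_corpus(raw_text):
--     if not raw_text: return []
--     lines = raw_text.splitlines()
--     start_patterns = ["*** START OF THIS PROJECT GUTENBERG EBOOK", "*** START OF THE PROJECT GUTENBERG EBOOK"]
--     end_patterns = ["*** END OF THIS PROJECT GUTENBERG EBOOK", "*** END OF THE PROJECT GUTENBERG EBOOK"]
--     start_index, end_index, start_marker_found = -1, len(lines), False
--     for i, line in enumerate(lines):
--         if any(p in line for p in start_patterns): start_index, start_marker_found = i + 1, True; continue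
--         if start_marker_found and any(p in line for p in end_patterns): end_index = i; break
--     if not start_marker_found: start_index = 0
--     content_lines = [line.strip() for line in lines[start_index:end_index] if line.strip()]
--     return content_lines
-- ===== SOURCE B (Python) =====
-- def _preprocess_corpus(raw_text):
--     if not raw_text:
--         return []
--     start_patterns = ["*** START OF THIS PROJECT GUTENBERG EBOOK", "*** START OF THE PROJECT GUTENBERG EBOOK"]
--     end_patterns = ["*** END OF THIS PROJECT GUTENBERG EBOOK", "*** END OF THE PROJECT GUTENBERG EBOOK"]
--     content, started = [], False
--     for line in raw_text.splitlines():
--         if any(p in line for p in start_patterns):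
--             content, started = [], True
--             continue
--         if started and any(p in line for p in end_patterns):
--             break
--         stripped = line.strip()
--         if stripped:
--             content.append(stripped)
--     return content
-- ===== Notes on version B (the rewrite author's own statement) =====
-- stated objective: simpler
-- what changed: Replaces A's two-phase design (an indexed scan computing start/end indices, then a slice plus a strip-filter comprehension) with a single pass that accumulates stripped non-empty lines directly, resetting the accumulator on a start marker and breaking on an end marker.
import Mathlib
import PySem

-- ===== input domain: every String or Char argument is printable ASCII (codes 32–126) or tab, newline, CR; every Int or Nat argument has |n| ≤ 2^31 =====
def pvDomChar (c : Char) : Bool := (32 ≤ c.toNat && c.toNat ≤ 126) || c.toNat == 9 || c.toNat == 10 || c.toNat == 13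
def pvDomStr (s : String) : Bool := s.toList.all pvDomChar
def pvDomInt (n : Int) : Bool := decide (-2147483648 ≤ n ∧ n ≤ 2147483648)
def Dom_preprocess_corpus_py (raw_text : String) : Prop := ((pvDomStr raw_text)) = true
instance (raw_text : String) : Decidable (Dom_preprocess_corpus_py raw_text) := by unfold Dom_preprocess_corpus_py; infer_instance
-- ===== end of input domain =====

-- B replaces A's index-computing scan + slice + comprehension with one accumulating pass (reset on start marker, break on end marker); same O(n) cost, simpler shape.

-- shared marker tests (both Pythons use the same literal pattern lists)
def pcStartPatterns : List String :=
  ["*** START OF THIS PROJECT GUTENBERG EBOOK", "*** START OF THE PROJECT GUTENBERG EBOOK"]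
def pcEndPatterns : List String :=
  ["*** END OF THIS PROJECT GUTENBERG EBOOK", "*** END OF THE PROJECT GUTENBERG EBOOK"]
def pcIsStart (line : String) : Bool := pcStartPatterns.any (fun p => PySem.Str.isIn p line)
def pcIsEnd (line : String) : Bool := pcEndPatterns.any (fun p => PySem.Str.isIn p line)

-- ===== PORT A =====
-- A's loop over enumerate(lines): state (start_index, end_index, start_marker_found); 'continue' = recurse, 'break' = return with end_index := i
def pcLoopA : List String → Nat → Int → Int → Bool → Int × Int × Bool
  | [], _, si, ei, found => (si, ei, found)
  | line :: rest, i, si, ei, found =>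
    if pcIsStart line then pcLoopA rest (i + 1) ((i : Int) + 1) ei true
    else if found && pcIsEnd line then (si, (i : Int), found)
    else pcLoopA rest (i + 1) si ei found

def preprocess_corpus_py (raw_text : String) : List String :=
  if raw_text = "" then []
  else
    let lines := PySem.Str.splitlines raw_text
    let r := pcLoopA lines 0 (-1) (lines.length : Int) false
    let start_index := if r.2.2 then r.1 else 0
    (PySem.List.slice lines (some start_index) (some r.2.1)).filterMap
      (fun line => let s := PySem.Str.strip line; if s = "" then none else some s)

-- ===== PORT B =====
-- B's single pass: content accumulator + started flag; reset on start marker, return early on end marker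
def pcLoopB : List String → List String → Bool → List String
  | [], content, _ => content
  | line :: rest, content, started =>
    if pcIsStart line then pcLoopB rest [] true
    else if started && pcIsEnd line then content
    else
      let stripped := PySem.Str.strip line
      pcLoopB rest (content ++ (if stripped = "" then [] else [stripped])) started

def preprocess_corpus_py_alt (raw_text : String) : List String :=
  if raw_text = "" then []
  else pcLoopB (PySem.Str.splitlines raw_text) [] false

-- ===== PRECONDITION & SPEC =====
def Spec_preprocess_corpus_py (raw_text : String) (out : List String) : Prop := out = preprocess_corpus_py_alt raw_text
instance (raw_text : String) (out : List String) : Decidable (Spec_preprocess_corpus_py raw_text out) := by unfold Spec_preprocess_corpus_py; infer_instance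

-- ===== CLAIM (what is proved, stated in full; the proofs are below) =====
def Claim_equal_preprocess_corpus_py : Prop := ∀ (raw_text : String), Dom_preprocess_corpus_py raw_text → Spec_preprocess_corpus_py raw_text (preprocess_corpus_py raw_text)

-- ===== LEMMAS AND PROOFS =====

-- abstract segment: the (unstripped) lines A's slice selects, given an accumulated prefix-segment
def pcSeg : List String → Bool → List String → List String
  | acc, _, [] => acc
  | acc, found, line :: rest =>
    if pcIsStart line then pcSeg [] true rest
    else if found && pcIsEnd line then acc
    else pcSeg (acc ++ [line]) found rest

def pcStrip (l : List String) : List String :=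
  l.filterMap (fun line => let s := PySem.Str.strip line; if s = "" then none else some s)

lemma pcLoopB_seg : ∀ (rest acc : List String) (found : Bool),
    pcLoopB rest (pcStrip acc) found = pcStrip (pcSeg acc found rest) := by
  intro rest
  induction rest with
  | nil => intro acc found; simp [pcLoopB, pcSeg]
  | cons line rest ih =>
    intro acc found
    by_cases hs : pcIsStart line
    · simpa [pcLoopB, pcSeg, hs] using ih [] true
    · by_cases he : found && pcIsEnd line
      · simp [pcLoopB, pcSeg, hs, he]
      · have hstep : pcStrip acc ++ (if PySem.Str.strip line = "" then [] else [PySem.Str.strip line])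
            = pcStrip (acc ++ [line]) := by
          by_cases h : PySem.Str.strip line = "" <;> simp [pcStrip, List.filterMap_append, h]
        simp only [pcLoopB, pcSeg, hs, he, Bool.false_eq_true, ↓reduceIte, hstep]
        exact ih (acc ++ [line]) found

lemma pcLoopA_seg : ∀ (rest pre : List String) (found : Bool) (s0 E : Nat),
    s0 ≤ pre.length → (found = false → s0 = 0) → (pre ++ rest).length ≤ E →
    ∃ (s1 e1 : Nat) (f1 : Bool),
      pcLoopA rest pre.length (if found then (s0 : Int) else -1) (E : Int) found
        = ((if f1 then (s1 : Int) else -1), (e1 : Int), f1) ∧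
      (((pre ++ rest).drop (if f1 then s1 else 0)).take (e1 - (if f1 then s1 else 0))
        = pcSeg (pre.drop s0) found rest) := by
  intro rest
  induction rest with
  | nil =>
    intro pre found s0 E h1 h2 hE
    simp only [List.append_nil] at hE ⊢
    refine ⟨s0, E, found, by simp [pcLoopA], ?_⟩
    cases found with
    | false =>
      rcases h2 rfl
      simp [pcSeg, List.take_of_length_le (by simpa using hE)]
    | true =>
      simp only [pcSeg]
      exact List.take_of_length_le (by simp; omega)
  | cons line rest ih =>
    intro pre found s0 E h1 h2 hE
    by_cases hs : pcIsStart line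
    · -- start marker: reset, segment restarts after this line
      obtain ⟨s1, e1, f1, hr, hseg⟩ :=
        ih (pre ++ [line]) true (pre.length + 1) E (by simp) (by simp)
          (by simpa [List.append_assoc] using hE)
      refine ⟨s1, e1, f1, ?_, ?_⟩
      · have h3 : ((pre.length : Int) + 1) = ((pre.length + 1 : Nat) : Int) := by push_cast; ring
        simp only [pcLoopA, hs, ite_true, h3]
        simpa [List.append_assoc] using hr
      · have hd : (pre ++ [line]).drop (pre.length + 1) = [] := by simp
        rw [show pre ++ line :: rest = (pre ++ [line]) ++ rest by simp, hseg, hd]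
        simp [pcSeg, hs]
    · by_cases he : found && pcIsEnd line
      · -- break: end index is the current position pre.length
        have hft : found = true := by cases found; simp at he; rfl
        have hel : pcIsEnd line = true := by cases hb : pcIsEnd line <;> simp_all
        refine ⟨s0, pre.length, true, by simp [pcLoopA, hs, hel, hft], ?_⟩
        have hpre : ((pre ++ line :: rest).drop s0).take (pre.length - s0) = pre.drop s0 := by
          rw [List.drop_append_of_le_length h1]
          have hl : (pre.drop s0).length = pre.length - s0 := by simp
          rw [List.take_append_of_le_length (by omega), List.take_of_length_le (by omega)]
        simpa [pcSeg, hs, hel, hft] using hpre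
      · -- ordinary line: it joins the current segment
        obtain ⟨s1, e1, f1, hr, hseg⟩ :=
          ih (pre ++ [line]) found s0 E (by simp; omega) h2
            (by simpa [List.append_assoc] using hE)
        refine ⟨s1, e1, f1, ?_, ?_⟩
        · simpa [pcLoopA, hs, he, List.append_assoc] using hr
        · have hacc : (pre ++ [line]).drop s0 = pre.drop s0 ++ [line] :=
            List.drop_append_of_le_length h1
          rw [show pre ++ line :: rest = (pre ++ [line]) ++ rest by simp, hseg, hacc]
          simp [pcSeg, hs, he]

-- ===== VERDICT (by name: the statement is the Claim_ definition above) =====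
theorem preprocess_corpus_py_spec : Claim_equal_preprocess_corpus_py := by
  intro raw_text _
  unfold Spec_preprocess_corpus_py preprocess_corpus_py preprocess_corpus_py_alt
  by_cases h0 : raw_text = ""
  · simp [h0]
  · simp only [h0, if_false]
    set lines := PySem.Str.splitlines raw_text with hl
    obtain ⟨s1, e1, f1, hr, hseg⟩ :=
      pcLoopA_seg lines [] false 0 lines.length (by simp) (fun _ => rfl) (by simp)
    simp only [List.nil_append, List.length_nil, List.drop_nil, Bool.false_eq_true,
      ↓reduceIte] at hr hseg
    rw [hr]
    have hsi : (if f1 then (if f1 then (s1 : Int) else -1) else 0)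
        = ((if f1 then s1 else 0 : Nat) : Int) := by cases f1 <;> simp
    simp only [hsi]
    rw [PySem.List.slice_natCast]
    show pcStrip _ = pcLoopB lines [] false
    rw [hseg]
    have hB := (pcLoopB_seg lines [] false).symm
    simpa [pcStrip] using hB
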